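-- pv_equiv track=rewrite | github.com/muribe0/TDA | TP2/tp2.py | juego
-- ===== SOURCE A (Python) =====
-- def reconstruir_solucion(OPT, monedas):
--     i, j = 0, len(monedas) - 1
--     monedas_sophi = []
--     """
--     La reconstruccion de la solucion aprovecha la matriz S asociada que contiene todas las decisiones optimas de cada jugador para todos los subconjuntos [i,j] in [1, n].
--     La matriz S, para cada valor i,j guarda la suma total de monedas elegidas por SOphia para el intervalo [i,j].
--     Comenzamos el analisis, entonces, desde i=1,j=n debido a que S_1,n representa la sumatotal de monedas elegidas por SOhpia para el intervalo total de monedas (desde la primer a la ultima). Ese valor, entonces, representa la suma entre la ultima moneda elegida por Sophia y las otras que haya elegido. Sabemos que esta ultima moneda fue tomada teniendo en cuenta y aprovechando calculos previos que se encuentran dentro de la matriz. En particular, la decision de tomar la moneda 1 o la moneda n depende de la decision de Mateo para el intervalo restante.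
--
--     La reconstruccion de la solucion, al igual que el algoritmo de construccion de la matriz S, considera la decision que tomaria Mateo:
--     1. Se fija cuanto acumularía Sophia en caso de agarrar la primer moneda + S_i',j'
--     2. Se fija cuanto acumularía Sophia en caso de agarrar la ultima moneda + S_i'',j''.
--     3. Compara cual de los dos es mayor. El camino mayor entre 1 y 2 va a ser lo que eligió y el valor guardado en S_i,j
--     4. Agrega entonces la primer o ultima moneda, segun la comparacion del paso 3 al conjunto de monedas elegidas por Sophia.
--     5. Avanza i -> i+1 si es que 2>=3, Avanza j -> j-1 si es que 2<3
--     6. Finalmente, sabiendo lo que ha decidido Mateo, se avanza un turno.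
--     """
--     while i <= j:
--         # Turno de Sophia
--         if i == j:
--             monedas_sophi.append(monedas[i])
--             break
--
--         # Si agarra la primera, me fijo que elije Mateo
--         if monedas[i+1] > monedas[j]:
--             i_izq, j_izq = i+2, j
--         else:
--             i_izq, j_izq = i+1, j-1
--
--         if OPT[i][j] == monedas[i] + OPT[i_izq][j_izq]: # si Sohpia eligio la primera ...
--             monedas_sophi.append(monedas[i])
--             i, j = i_izq, j_izq
--             continue
--
--         if monedas[i] > monedas[j-1]:
--             i_der, j_der = i+1, j-1
--         else:
--             i_der, j_der = i, j-2
--         monedas_sophi.append(monedas[j])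
--         i, j = i_der, j_der
--
--     return monedas_sophi
--
-- def juego(monedas):
--     n = len(monedas)
--     OPT = [[0 for _ in range(n)] for _ in range(n)]
--
--     for j in range(n):
--         for i in range(j, -1, -1):  # esto itera (f,c): (0,0)->(1,1)->(0,1)->(2,2)->(1,2)->(0,2)->...
--             largo = abs(i - j) + 1
--
--             if largo == 1:
--                 # Caso base
--                 OPT[i][j] = monedas[i]
--             else:
--                 # Si toma la primer moneda, Mateo debe elegir la mejor de las que quedan:
--                 if monedas[i+1] > monedas[j]:
--                     i_izq = i+2
--                     j_izq = j
--                 else: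
--                     i_izq = i+1
--                     j_izq = j-1
--
--                 # Si toma la ultima moneda, Mateo debe elegir la mejor de las que quedan:
--                 if monedas[i] > monedas[j-1]:
--                     i_der = i+1
--                     j_der = j-1
--                 else:
--                     i_der = i
--                     j_der = j-2
--
--                 OPT[i][j] = max(monedas[i] + OPT[i_izq][j_izq],  monedas[j] + OPT[i_der][j_der])
--
--
--     return reconstruir_solucion(OPT, monedas)
-- ===== SOURCE B (Python) =====
-- def juego(monedas):
--     # Top-down memoized recursion over intervals instead of a bottom-up table
--     # plus separate reconstruction: sol(i, j) returns (Sophia's optimal value,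
--     # her list of picks) for monedas[i..j], front favored on ties.
--     memo = {}
--
--     def sol(i, j):
--         if i > j:
--             return (0, [])
--         if (i, j) in memo:
--             return memo[(i, j)]
--         if i == j:
--             r = (monedas[i], [monedas[i]])
--         else:
--             # If Sophia takes the front, Mateo greedily takes the larger end of the rest
--             if monedas[i + 1] > monedas[j]:
--                 li, lj = i + 2, j
--             else:
--                 li, lj = i + 1, j - 1
--             # If Sophia takes the back, same for Mateo
--             if monedas[i] > monedas[j - 1]:
--                 ri, rj = i + 1, j - 1
--             else:
--                 ri, rj = i, j - 2
--             left = sol(li, lj)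
--             right = sol(ri, rj)
--             if monedas[i] + left[0] >= monedas[j] + right[0]:
--                 r = (monedas[i] + left[0], [monedas[i]] + left[1])
--             else:
--                 r = (monedas[j] + right[0], [monedas[j]] + right[1])
--         memo[(i, j)] = r
--         return r
--
--     return sol(0, len(monedas) - 1)[1]
-- ===== Notes on version B (the rewrite author's own statement) =====
-- stated objective: alternative
-- what changed: Replaces A's bottom-up n×n table fill plus a separate reconstruction walk over the finished table by a single top-down recursion over intervals (memoized in Python) that returns (Sophia's optimal value, her list of picks) directly, computing only the intervals actually reachable from [0, n-1].
import Mathlib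
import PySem

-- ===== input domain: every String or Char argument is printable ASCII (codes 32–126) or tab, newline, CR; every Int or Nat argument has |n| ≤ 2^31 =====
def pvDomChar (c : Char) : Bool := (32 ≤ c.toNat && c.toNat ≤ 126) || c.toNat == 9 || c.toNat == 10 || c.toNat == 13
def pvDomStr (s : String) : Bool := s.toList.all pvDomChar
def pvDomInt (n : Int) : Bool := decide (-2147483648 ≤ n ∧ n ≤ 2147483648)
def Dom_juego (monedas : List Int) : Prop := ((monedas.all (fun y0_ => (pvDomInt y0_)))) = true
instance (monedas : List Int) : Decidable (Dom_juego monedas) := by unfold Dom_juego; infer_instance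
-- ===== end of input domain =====

-- B replaces A's bottom-up n×n table fill plus separate reconstruction walk by one
-- top-down recursion over intervals returning (value, Sophia's picks) directly;
-- objective: alternative decomposition (same exact output).

-- ===== PORT A =====

-- OPT[a][b] (Python list-of-lists read; indices may be -1, which wraps)
def pvGet2 (T : List (List Int)) (a b : Int) : Int :=
  PySem.List.pyGetD (PySem.List.pyGetD T a []) b 0

-- OPT[a][b] = v (write indices are always ≥ 0 and in range in A)
def pvSet2 (T : List (List Int)) (a b : Int) (v : Int) : List (List Int) :=
  PySem.List.pySetD T a (PySem.List.pySetD (PySem.List.pyGetD T a []) b v)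

-- body of A's double loop: fills cell (i, j)
def pvCell (m : List Int) (T : List (List Int)) (i j : Int) : List (List Int) :=
  let largo := |i - j| + 1
  if largo == 1 then
    pvSet2 T i j (PySem.List.pyGetD m i 0)
  else
    let lij := if PySem.List.pyGetD m (i+1) 0 > PySem.List.pyGetD m j 0
               then (i+2, j) else (i+1, j-1)
    let rij := if PySem.List.pyGetD m i 0 > PySem.List.pyGetD m (j-1) 0
               then (i+1, j-1) else (i, j-2)
    pvSet2 T i j (max (PySem.List.pyGetD m i 0 + pvGet2 T lij.1 lij.2)
                      (PySem.List.pyGetD m j 0 + pvGet2 T rij.1 rij.2))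

-- the while-loop of reconstruir_solucion (acc = monedas_sophi)
def pvRecon (OPT : List (List Int)) (m : List Int) (i j : Int) (acc : List Int) : List Int :=
  if _h : i ≤ j then
    if i = j then acc ++ [PySem.List.pyGetD m i 0]
    else
      let lij := if PySem.List.pyGetD m (i+1) 0 > PySem.List.pyGetD m j 0
                 then (i+2, j) else (i+1, j-1)
      if pvGet2 OPT i j = PySem.List.pyGetD m i 0 + pvGet2 OPT lij.1 lij.2 then
        pvRecon OPT m lij.1 lij.2 (acc ++ [PySem.List.pyGetD m i 0])
      else
        let rij := if PySem.List.pyGetD m i 0 > PySem.List.pyGetD m (j-1) 0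
                   then (i+1, j-1) else (i, j-2)
        pvRecon OPT m rij.1 rij.2 (acc ++ [PySem.List.pyGetD m j 0])
  else acc
termination_by (j - i + 1).toNat
decreasing_by
  all_goals (split <;> simp <;> omega)

def reconstruir_solucion (OPT : List (List Int)) (monedas : List Int) : List Int :=
  pvRecon OPT monedas 0 ((monedas.length : Int) - 1) []

def juego (monedas : List Int) : List Int :=
  let n : Int := monedas.length
  let OPT0 : List (List Int) :=
    (PySem.List.pyRange 0 n 1).map (fun _ => (PySem.List.pyRange 0 n 1).map (fun _ => (0:Int)))
  let OPT :=
    (PySem.List.pyRange 0 n 1).foldl (fun T j =>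
      (PySem.List.pyRange j (-1) (-1)).foldl (fun T' i => pvCell monedas T' i j) T) OPT0
  reconstruir_solucion OPT monedas

-- ===== PORT B =====

-- sol(i, j) of Source B: (Sophia's optimal value, her picks) for monedas[i..j].
-- Source B's memo dict is a pure cache (identical values); the port is the same recursion without it.
def juegoSol (m : List Int) (i j : Int) : Int × List Int :=
  if i > j then (0, [])
  else if i = j then (PySem.List.pyGetD m i 0, [PySem.List.pyGetD m i 0])
  else
    let lij := if PySem.List.pyGetD m (i+1) 0 > PySem.List.pyGetD m j 0
               then (i+2, j) else (i+1, j-1)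
    let rij := if PySem.List.pyGetD m i 0 > PySem.List.pyGetD m (j-1) 0
               then (i+1, j-1) else (i, j-2)
    let left := juegoSol m lij.1 lij.2
    let right := juegoSol m rij.1 rij.2
    if PySem.List.pyGetD m i 0 + left.1 ≥ PySem.List.pyGetD m j 0 + right.1 then
      (PySem.List.pyGetD m i 0 + left.1, PySem.List.pyGetD m i 0 :: left.2)
    else
      (PySem.List.pyGetD m j 0 + right.1, PySem.List.pyGetD m j 0 :: right.2)
termination_by (j - i + 1).toNat
decreasing_by
  · split <;> simp <;> omega
  · split <;> simp <;> omega

def juego_alt (monedas : List Int) : List Int :=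
  (juegoSol monedas 0 ((monedas.length : Int) - 1)).2

-- ===== PRECONDITION & SPEC =====
def Spec_juego (monedas : List Int) (out : List Int) : Prop := out = juego_alt monedas
instance (monedas : List Int) (out : List Int) : Decidable (Spec_juego monedas out) := by unfold Spec_juego; infer_instance

-- ===== CLAIM (what is proved, stated in full; the proofs are below) =====
def Claim_equal_juego : Prop := ∀ (monedas : List Int), Dom_juego monedas → Spec_juego monedas (juego monedas)

-- ===== LEMMAS AND PROOFS =====

theorem pvGet2_pvSet2 {n : Nat} (T : List (List Int)) (hl : T.length = n)
    (hr : ∀ r ∈ T, r.length = n) (p q a b : Int) (v : Int)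
    (hp : 0 ≤ p) (hpn : p < n) (hq : 0 ≤ q) (hqn : q < n)
    (ha : 0 ≤ a) (_han : a < n) (hb : 0 ≤ b) (_hbn : b < n) :
    pvGet2 (pvSet2 T p q v) a b = if a = p ∧ b = q then v else pvGet2 T a b := by
  have hrow : (PySem.List.pyGetD T p []).length = n := by
    apply hr
    rw [PySem.List.pyGetD_eq_getElem T [] hp (by omega)]
    exact List.getElem_mem _
  have hp' : p = ((p.toNat : Nat) : Int) := by omega
  have hq' : q = ((q.toNat : Nat) : Int) := by omega
  have ha' : a = ((a.toNat : Nat) : Int) := by omega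
  have hb' : b = ((b.toNat : Nat) : Int) := by omega
  rw [hp'] at hrow
  rw [pvGet2, pvSet2, hp', ha', hb', hq',
    PySem.List.pyGetD_pySetD_natCast T p.toNat a.toNat _ [] (by omega)]
  by_cases hap : a.toNat = p.toNat
  · rw [if_pos hap, PySem.List.pyGetD_pySetD_natCast _ q.toNat b.toNat v 0 (by omega)]
    by_cases hbq : b.toNat = q.toNat
    · rw [if_pos hbq, if_pos ⟨by omega, by omega⟩]
    · rw [if_neg hbq, if_neg (by omega), pvGet2, hap]
  · rw [if_neg hap, if_neg (by omega), pvGet2]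

theorem pvSet2_shape {n : Nat} (T : List (List Int)) (hl : T.length = n)
    (hr : ∀ r ∈ T, r.length = n) (p q : Int) (v : Int) (hp : 0 ≤ p) (hpn : p < n) :
    (pvSet2 T p q v).length = n ∧ ∀ r ∈ pvSet2 T p q v, r.length = n := by
  constructor
  · rw [pvSet2, PySem.List.length_pySetD, hl]
  · intro r hrm
    rw [pvSet2, PySem.List.pySetD_of_nonneg _ _ hp] at hrm
    rcases List.mem_or_eq_of_mem_set hrm with h | h
    · exact hr r h
    · subst h
      rw [PySem.List.length_pySetD]
      apply hr
      rw [PySem.List.pyGetD_eq_getElem T [] hp (by omega)]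
      exact List.getElem_mem _

theorem juegoSol_of_gt (m : List Int) (i j : Int) (h : j < i) : juegoSol m i j = (0, []) := by
  rw [juegoSol]
  simp [show i > j from h]

theorem juegoSol_of_eq (m : List Int) (i : Int) :
    juegoSol m i i = (PySem.List.pyGetD m i 0, [PySem.List.pyGetD m i 0]) := by
  rw [juegoSol]
  simp
theorem juegoSol_fst_of_lt (m : List Int) (i j : Int) (h : i < j) :
    (juegoSol m i j).1 =
      max (PySem.List.pyGetD m i 0 +
            (juegoSol m (if PySem.List.pyGetD m (i+1) 0 > PySem.List.pyGetD m j 0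
                         then (i+2, j) else (i+1, j-1)).1
                        (if PySem.List.pyGetD m (i+1) 0 > PySem.List.pyGetD m j 0
                         then (i+2, j) else (i+1, j-1)).2).1)
          (PySem.List.pyGetD m j 0 +
            (juegoSol m (if PySem.List.pyGetD m i 0 > PySem.List.pyGetD m (j-1) 0
                         then (i+1, j-1) else (i, j-2)).1
                        (if PySem.List.pyGetD m i 0 > PySem.List.pyGetD m (j-1) 0
                         then (i+1, j-1) else (i, j-2)).2).1) := by
  rw [juegoSol, if_neg (by omega), if_neg (by omega)]
  by_cases hc1 : PySem.List.pyGetD m (i+1) 0 > PySem.List.pyGetD m j 0 <;>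
    by_cases hc2 : PySem.List.pyGetD m i 0 > PySem.List.pyGetD m (j-1) 0 <;>
      simp only [hc1, hc2, if_true, if_false] <;>
        split_ifs <;> dsimp only <;> omega

theorem juegoSol_snd_of_lt (m : List Int) (i j : Int) (h : i < j) :
    (juegoSol m i j).2 =
      (if PySem.List.pyGetD m i 0 +
            (juegoSol m (if PySem.List.pyGetD m (i+1) 0 > PySem.List.pyGetD m j 0
                         then (i+2, j) else (i+1, j-1)).1
                        (if PySem.List.pyGetD m (i+1) 0 > PySem.List.pyGetD m j 0
                         then (i+2, j) else (i+1, j-1)).2).1 ≥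
          PySem.List.pyGetD m j 0 +
            (juegoSol m (if PySem.List.pyGetD m i 0 > PySem.List.pyGetD m (j-1) 0
                         then (i+1, j-1) else (i, j-2)).1
                        (if PySem.List.pyGetD m i 0 > PySem.List.pyGetD m (j-1) 0
                         then (i+1, j-1) else (i, j-2)).2).1
       then PySem.List.pyGetD m i 0 ::
            (juegoSol m (if PySem.List.pyGetD m (i+1) 0 > PySem.List.pyGetD m j 0
                         then (i+2, j) else (i+1, j-1)).1
                        (if PySem.List.pyGetD m (i+1) 0 > PySem.List.pyGetD m j 0
                         then (i+2, j) else (i+1, j-1)).2).2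
       else PySem.List.pyGetD m j 0 ::
            (juegoSol m (if PySem.List.pyGetD m i 0 > PySem.List.pyGetD m (j-1) 0
                         then (i+1, j-1) else (i, j-2)).1
                        (if PySem.List.pyGetD m i 0 > PySem.List.pyGetD m (j-1) 0
                         then (i+1, j-1) else (i, j-2)).2).2) := by
  rw [juegoSol, if_neg (by omega), if_neg (by omega)]
  by_cases hc1 : PySem.List.pyGetD m (i+1) 0 > PySem.List.pyGetD m j 0 <;>
    by_cases hc2 : PySem.List.pyGetD m i 0 > PySem.List.pyGetD m (j-1) 0 <;>
      simp only [hc1, hc2, if_true, if_false] <;> split_ifs <;> rfl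

def pvInv (m : List Int) (T : List (List Int)) (jc ic : Int) : Prop :=
  T.length = m.length ∧ (∀ r ∈ T, r.length = m.length) ∧
  ∀ a b : Int, 0 ≤ a → a < m.length → 0 ≤ b → b < m.length →
    pvGet2 T a b =
      if a ≤ b ∧ (b < jc ∨ (b = jc ∧ ic < a)) then (juegoSol m a b).1 else 0

theorem pvInv_readV_low (m : List Int) (T : List (List Int)) (jc ic : Int)
    (h : pvInv m T jc ic) (a b : Int) (ha : 0 ≤ a) (han : a < m.length)
    (hb : 0 ≤ b) (hbj : b < jc) (hjn : jc ≤ m.length) :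
    pvGet2 T a b = (juegoSol m a b).1 := by
  rw [h.2.2 a b ha han hb (by omega)]
  by_cases hab : a ≤ b
  · rw [if_pos ⟨hab, Or.inl hbj⟩]
  · rw [if_neg (by omega), juegoSol_of_gt m a b (by omega)]

theorem pvInv_readV_cur (m : List Int) (T : List (List Int)) (jc ic : Int)
    (h : pvInv m T jc ic) (a : Int) (ha : 0 ≤ a) (haj : a ≤ jc) (hjn : jc < m.length)
    (hia : ic < a) :
    pvGet2 T a jc = (juegoSol m a jc).1 := by
  rw [h.2.2 a jc ha (by omega) (by omega) hjn, if_pos ⟨haj, Or.inr ⟨rfl, hia⟩⟩]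

theorem pvInv_read_neg_one (m : List Int) (T : List (List Int)) (jc ic : Int)
    (h : pvInv m T jc ic) (a : Int) (ha : 0 ≤ a) (han : a < m.length)
    (hjn : jc < m.length) (hlast : (m.length : Int) - 1 = jc → ¬ ic < a) :
    pvGet2 T a (-1) = 0 := by
  obtain ⟨hl, hrw, hv⟩ := h
  have hn : 0 < m.length := by omega
  have hrow : (PySem.List.pyGetD T a []).length = m.length := by
    apply hrw
    rw [PySem.List.pyGetD_eq_getElem T [] ha (by omega)]
    exact List.getElem_mem _
  have h1 : pvGet2 T a (-1) =
      (PySem.List.pyGetD T a [])[(PySem.List.pyGetD T a []).length - 1] := by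
    rw [pvGet2]
    rw [show (-1 : Int) = -((1:Nat):Int) by norm_num]
    rw [PySem.List.pyGetD_neg_natCast _ 1 0 (by omega) (by omega)]
  have h2 : pvGet2 T a ((m.length : Int) - 1) =
      (PySem.List.pyGetD T a [])[(PySem.List.pyGetD T a []).length - 1] := by
    rw [pvGet2, PySem.List.pyGetD_eq_getElem _ 0 (by omega) (by rw [hrow]; omega)]
    congr 1
    omega
  have hcond : ¬ (a ≤ (m.length:Int) - 1 ∧ ((m.length:Int) - 1 < jc ∨ ((m.length:Int) - 1 = jc ∧ ic < a))) := by
    rintro ⟨h1', h2' | ⟨h3', h4'⟩⟩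
    · omega
    · exact hlast h3' h4'
  rw [h1, ← h2, hv a ((m.length : Int) - 1) ha han (by omega) (by omega), if_neg hcond]
theorem pvInv_step (m : List Int) (T : List (List Int)) (i j : Int)
    (hi : 0 ≤ i) (hij : i ≤ j) (hj : j < m.length)
    (h : pvInv m T j i) : pvInv m (pvCell m T i j) j (i - 1) := by
  obtain ⟨hl, hrw, hv⟩ := h
  by_cases hije : i = j
  · subst hije
    have hcell : pvCell m T i i = pvSet2 T i i (PySem.List.pyGetD m i 0) := by
      rw [pvCell, if_pos (by simp)]
    rw [hcell]
    refine ⟨(pvSet2_shape T hl hrw i i _ hi (by omega)).1,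
            (pvSet2_shape T hl hrw i i _ hi (by omega)).2, ?_⟩
    intro a b ha han hb hbn
    rw [pvGet2_pvSet2 T hl hrw i i a b _ hi (by omega) hi (by omega) ha han hb hbn]
    by_cases hab : a = i ∧ b = i
    · rw [if_pos hab, hab.1, hab.2, if_pos ⟨le_rfl, Or.inr ⟨rfl, by omega⟩⟩, juegoSol_of_eq]
    · rw [if_neg hab, hv a b ha han hb hbn]
      congr 1
      simp only [eq_iff_iff]
      constructor <;> intro hc <;> refine ⟨hc.1, ?_⟩ <;> rcases hc with ⟨hc1, hc2⟩ <;> omega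
  · have hilt : i < j := by omega
    have hL : pvGet2 T (if PySem.List.pyGetD m (i+1) 0 > PySem.List.pyGetD m j 0
          then (i+2, j) else (i+1, j-1)).1
        (if PySem.List.pyGetD m (i+1) 0 > PySem.List.pyGetD m j 0
          then (i+2, j) else (i+1, j-1)).2 =
        (juegoSol m (if PySem.List.pyGetD m (i+1) 0 > PySem.List.pyGetD m j 0
          then (i+2, j) else (i+1, j-1)).1
        (if PySem.List.pyGetD m (i+1) 0 > PySem.List.pyGetD m j 0
          then (i+2, j) else (i+1, j-1)).2).1 := by
      split_ifs with hc1
      · have hne : i + 1 ≠ j := by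
          rintro rfl
          exact lt_irrefl _ hc1
        exact pvInv_readV_cur m T j i ⟨hl, hrw, hv⟩ (i+2) (by omega) (by omega) hj (by omega)
      · by_cases hsz : i + 1 ≤ j - 1
        · exact pvInv_readV_low m T j i ⟨hl, hrw, hv⟩ (i+1) (j-1) (by omega) (by omega)
            (by omega) (by omega) (by omega)
        · rw [hv (i+1) (j-1) (by omega) (by omega) (by omega) (by omega),
            if_neg (by omega), juegoSol_of_gt m _ _ (by omega)]
    have hR : pvGet2 T (if PySem.List.pyGetD m i 0 > PySem.List.pyGetD m (j-1) 0
          then (i+1, j-1) else (i, j-2)).1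
        (if PySem.List.pyGetD m i 0 > PySem.List.pyGetD m (j-1) 0
          then (i+1, j-1) else (i, j-2)).2 =
        (juegoSol m (if PySem.List.pyGetD m i 0 > PySem.List.pyGetD m (j-1) 0
          then (i+1, j-1) else (i, j-2)).1
        (if PySem.List.pyGetD m i 0 > PySem.List.pyGetD m (j-1) 0
          then (i+1, j-1) else (i, j-2)).2).1 := by
      split_ifs with hc2
      · have hne : j ≠ i + 1 := by
          rintro rfl
          rw [show i + (1:Int) - 1 = i from by omega] at hc2
          exact lt_irrefl _ hc2
        exact pvInv_readV_low m T j i ⟨hl, hrw, hv⟩ (i+1) (j-1) (by omega) (by omega)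
          (by omega) (by omega) (by omega)
      · by_cases hsz : 0 ≤ j - 2
        · by_cases hsz2 : i ≤ j - 2
          · exact pvInv_readV_low m T j i ⟨hl, hrw, hv⟩ i (j-2) hi (by omega)
              (by omega) (by omega) (by omega)
          · rw [hv i (j-2) hi (by omega) (by omega) (by omega),
              if_neg (by omega), juegoSol_of_gt m _ _ (by omega)]
        · have hj1 : j = 1 := by omega
          have hi0 : i = 0 := by omega
          have hm : j - 2 = -1 := by omega
          rw [hm, juegoSol_of_gt m _ _ (by omega)]
          exact pvInv_read_neg_one m T j i ⟨hl, hrw, hv⟩ i hi (by omega) hj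
            (fun _ => by omega)
    have hlargo : ¬ ((|i - j| + 1 == 1) = true) := by
      simp only [beq_iff_eq]
      rw [abs_of_nonpos (by omega : i - j ≤ 0)]
      omega
    have hcell : pvCell m T i j = pvSet2 T i j
        (max (PySem.List.pyGetD m i 0 +
            pvGet2 T (if PySem.List.pyGetD m (i+1) 0 > PySem.List.pyGetD m j 0
              then (i+2, j) else (i+1, j-1)).1
              (if PySem.List.pyGetD m (i+1) 0 > PySem.List.pyGetD m j 0
              then (i+2, j) else (i+1, j-1)).2)
          (PySem.List.pyGetD m j 0 +
            pvGet2 T (if PySem.List.pyGetD m i 0 > PySem.List.pyGetD m (j-1) 0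
              then (i+1, j-1) else (i, j-2)).1
              (if PySem.List.pyGetD m i 0 > PySem.List.pyGetD m (j-1) 0
              then (i+1, j-1) else (i, j-2)).2)) := by
      rw [pvCell, if_neg hlargo]
    have hval : (max (PySem.List.pyGetD m i 0 +
            pvGet2 T (if PySem.List.pyGetD m (i+1) 0 > PySem.List.pyGetD m j 0
              then (i+2, j) else (i+1, j-1)).1
              (if PySem.List.pyGetD m (i+1) 0 > PySem.List.pyGetD m j 0
              then (i+2, j) else (i+1, j-1)).2)
          (PySem.List.pyGetD m j 0 +
            pvGet2 T (if PySem.List.pyGetD m i 0 > PySem.List.pyGetD m (j-1) 0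
              then (i+1, j-1) else (i, j-2)).1
              (if PySem.List.pyGetD m i 0 > PySem.List.pyGetD m (j-1) 0
              then (i+1, j-1) else (i, j-2)).2)) = (juegoSol m i j).1 := by
      rw [hL, hR, juegoSol_fst_of_lt m i j hilt]
    rw [hcell]
    refine ⟨(pvSet2_shape T hl hrw i j _ hi (by omega)).1,
            (pvSet2_shape T hl hrw i j _ hi (by omega)).2, ?_⟩
    intro a b ha han hb hbn
    rw [pvGet2_pvSet2 T hl hrw i j a b _ hi (by omega) (by omega) (by omega) ha han hb hbn]
    by_cases hab : a = i ∧ b = j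
    · have hpos : i ≤ j ∧ (j < j ∨ (j = j ∧ i - 1 < i)) := ⟨by omega, Or.inr ⟨rfl, by omega⟩⟩
      rw [if_pos hab, hab.1, hab.2, if_pos hpos, hval]
    · rw [if_neg hab, hv a b ha han hb hbn]
      congr 1
      simp only [eq_iff_iff]
      constructor <;> intro hc <;> refine ⟨hc.1, ?_⟩ <;> rcases hc with ⟨hc1, hc2⟩ <;> omega
theorem pvInv_init (m : List Int) :
    pvInv m ((PySem.List.pyRange 0 m.length 1).map
      (fun _ => (PySem.List.pyRange 0 m.length 1).map (fun _ => (0:Int)))) 0 0 := by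
  refine ⟨by simp [PySem.List.length_pyRange_one], ?_, ?_⟩
  · intro r hr
    simp only [List.mem_map] at hr
    obtain ⟨x, -, rfl⟩ := hr
    simp [PySem.List.length_pyRange_one]
  · intro a b ha han hb hbn
    have h2 : pvGet2 ((PySem.List.pyRange 0 (m.length:Int) 1).map
        (fun _ => (PySem.List.pyRange 0 (m.length:Int) 1).map (fun _ => (0:Int)))) a b = 0 := by
      rw [pvGet2, PySem.List.pyGetD_map_pyRange_of_nonneg _ _ _ _ ha han,
        PySem.List.pyGetD_map_pyRange_of_nonneg _ _ _ _ hb hbn]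
    rw [h2, if_neg (by omega)]

theorem pvInv_shift (m : List Int) (T : List (List Int)) (j : Int)
    (h : pvInv m T j (-1)) : pvInv m T (j+1) (j+1) := by
  obtain ⟨h1, h2, h3⟩ := h
  refine ⟨h1, h2, ?_⟩
  intro a b ha han hb hbn
  rw [h3 a b ha han hb hbn]
  congr 1
  simp only [eq_iff_iff]
  constructor <;> intro hc <;> refine ⟨hc.1, ?_⟩ <;> rcases hc with ⟨hx, hy⟩ <;> omega

theorem pvInv_inner (m : List Int) (j : Int) (_hj0 : 0 ≤ j) (hjn : j < m.length) :
    ∀ (i : Int) (T : List (List Int)), -1 ≤ i → i ≤ j → pvInv m T j i →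
      pvInv m ((PySem.List.pyRange i (-1) (-1)).foldl (fun T' i' => pvCell m T' i' j) T) j (-1) := by
  intro i
  induction hk : (i + 1).toNat generalizing i with
  | zero =>
    intro T hi1 hij hT
    rw [PySem.List.pyRange_neg_one_eq_nil (by omega)]
    simpa using (by omega : i = -1) ▸ hT
  | succ k ih =>
    intro T hi1 hij hT
    rw [PySem.List.pyRange_neg_one_cons (by omega), List.foldl_cons]
    exact ih (i-1) (by omega) _ (by omega) (by omega)
      (pvInv_step m T i j (by omega) hij hjn hT)

theorem pvInv_outer (m : List Int) :
    ∀ (j : Int) (T : List (List Int)), 0 ≤ j → j ≤ m.length → pvInv m T j j →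
      pvInv m ((PySem.List.pyRange j m.length 1).foldl (fun T' j' =>
        (PySem.List.pyRange j' (-1) (-1)).foldl (fun T'' i => pvCell m T'' i j') T') T)
        (m.length) (m.length) := by
  intro j
  induction hk : ((m.length : Int) - j).toNat generalizing j with
  | zero =>
    intro T hj0 hjn hT
    rw [PySem.List.pyRange_one_eq_nil (by omega)]
    simpa using (by omega : j = (m.length : Int)) ▸ hT
  | succ k ih =>
    intro T hj0 hjn hT
    rw [PySem.List.pyRange_one_cons (by omega), List.foldl_cons]
    apply ih (j+1) <;> first
      | omega
      | exact pvInv_shift m _ j (pvInv_inner m j hj0 (by omega) j T (by omega) le_rfl hT)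

theorem pvRecon_eq (m : List Int) (T : List (List Int)) (hT : pvInv m T m.length m.length) :
    ∀ (k : Nat) (i j : Int) (acc : List Int), (j - i + 1).toNat ≤ k → 0 ≤ i → j < m.length →
      pvRecon T m i j acc = acc ++ (juegoSol m i j).2 := by
  have hread : ∀ a b : Int, 0 ≤ a → a < m.length → 0 ≤ b → b < m.length →
      pvGet2 T a b = (juegoSol m a b).1 := by
    intro a b ha han hb hbn
    exact pvInv_readV_low m T m.length m.length hT a b ha han hb hbn le_rfl
  intro k
  induction k with
  | zero =>
    intro i j acc hk hi hj
    rw [pvRecon, dif_neg (by omega), juegoSol_of_gt m i j (by omega)]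
    simp
  | succ k ih =>
    intro i j acc hk hi hj
    by_cases hij : i ≤ j
    case neg =>
      rw [pvRecon, dif_neg hij, juegoSol_of_gt m i j (by omega)]
      simp
    case pos =>
    by_cases hije : i = j
    · subst hije
      rw [pvRecon, dif_pos le_rfl, if_pos rfl, juegoSol_of_eq]
    · have hilt : i < j := by omega
      rw [pvRecon, dif_pos hij, if_neg hije]
      have hLb : pvGet2 T (if PySem.List.pyGetD m (i+1) 0 > PySem.List.pyGetD m j 0
            then (i+2, j) else (i+1, j-1)).1
          (if PySem.List.pyGetD m (i+1) 0 > PySem.List.pyGetD m j 0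
            then (i+2, j) else (i+1, j-1)).2 =
          (juegoSol m (if PySem.List.pyGetD m (i+1) 0 > PySem.List.pyGetD m j 0
            then (i+2, j) else (i+1, j-1)).1
          (if PySem.List.pyGetD m (i+1) 0 > PySem.List.pyGetD m j 0
            then (i+2, j) else (i+1, j-1)).2).1 := by
        split_ifs with hc1
        · have hne : i + 1 ≠ j := by
            rintro rfl
            exact lt_irrefl _ hc1
          exact hread (i+2) j (by omega) (by omega) (by omega) (by omega)
        · exact hread (i+1) (j-1) (by omega) (by omega) (by omega) (by omega)
      have hfst := juegoSol_fst_of_lt m i j hilt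
      have hsnd := juegoSol_snd_of_lt m i j hilt
      by_cases htest : pvGet2 T i j = PySem.List.pyGetD m i 0 +
          pvGet2 T (if PySem.List.pyGetD m (i+1) 0 > PySem.List.pyGetD m j 0
            then (i+2, j) else (i+1, j-1)).1
          (if PySem.List.pyGetD m (i+1) 0 > PySem.List.pyGetD m j 0
            then (i+2, j) else (i+1, j-1)).2
      · rw [if_pos htest]
        rw [hread i j (by omega) (by omega) (by omega) (by omega), hLb, hfst] at htest
        have hge : PySem.List.pyGetD m i 0 +
            (juegoSol m (if PySem.List.pyGetD m (i+1) 0 > PySem.List.pyGetD m j 0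
              then (i+2, j) else (i+1, j-1)).1
            (if PySem.List.pyGetD m (i+1) 0 > PySem.List.pyGetD m j 0
              then (i+2, j) else (i+1, j-1)).2).1 ≥
            PySem.List.pyGetD m j 0 +
            (juegoSol m (if PySem.List.pyGetD m i 0 > PySem.List.pyGetD m (j-1) 0
              then (i+1, j-1) else (i, j-2)).1
            (if PySem.List.pyGetD m i 0 > PySem.List.pyGetD m (j-1) 0
              then (i+1, j-1) else (i, j-2)).2).1 := by omega
        rw [hsnd, if_pos hge]
        have hrec : pvRecon T m
            (if PySem.List.pyGetD m (i+1) 0 > PySem.List.pyGetD m j 0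
              then (i+2, j) else (i+1, j-1)).1
            (if PySem.List.pyGetD m (i+1) 0 > PySem.List.pyGetD m j 0
              then (i+2, j) else (i+1, j-1)).2
            (acc ++ [PySem.List.pyGetD m i 0]) =
            (acc ++ [PySem.List.pyGetD m i 0]) ++
            (juegoSol m (if PySem.List.pyGetD m (i+1) 0 > PySem.List.pyGetD m j 0
              then (i+2, j) else (i+1, j-1)).1
            (if PySem.List.pyGetD m (i+1) 0 > PySem.List.pyGetD m j 0
              then (i+2, j) else (i+1, j-1)).2).2 := by
          split_ifs with hc1
          · have hne : i + 1 ≠ j := by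
              rintro rfl
              exact lt_irrefl _ hc1
            exact ih (i+2) j _ (by omega) (by omega) (by omega)
          · exact ih (i+1) (j-1) _ (by omega) (by omega) (by omega)
        rw [hrec]
        simp
      · rw [if_neg htest]
        rw [hread i j (by omega) (by omega) (by omega) (by omega), hLb, hfst] at htest
        have hlt : ¬ (PySem.List.pyGetD m i 0 +
            (juegoSol m (if PySem.List.pyGetD m (i+1) 0 > PySem.List.pyGetD m j 0
              then (i+2, j) else (i+1, j-1)).1
            (if PySem.List.pyGetD m (i+1) 0 > PySem.List.pyGetD m j 0
              then (i+2, j) else (i+1, j-1)).2).1 ≥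
            PySem.List.pyGetD m j 0 +
            (juegoSol m (if PySem.List.pyGetD m i 0 > PySem.List.pyGetD m (j-1) 0
              then (i+1, j-1) else (i, j-2)).1
            (if PySem.List.pyGetD m i 0 > PySem.List.pyGetD m (j-1) 0
              then (i+1, j-1) else (i, j-2)).2).1) := by omega
        rw [hsnd, if_neg hlt]
        have hrec : pvRecon T m
            (if PySem.List.pyGetD m i 0 > PySem.List.pyGetD m (j-1) 0
              then (i+1, j-1) else (i, j-2)).1
            (if PySem.List.pyGetD m i 0 > PySem.List.pyGetD m (j-1) 0
              then (i+1, j-1) else (i, j-2)).2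
            (acc ++ [PySem.List.pyGetD m j 0]) =
            (acc ++ [PySem.List.pyGetD m j 0]) ++
            (juegoSol m (if PySem.List.pyGetD m i 0 > PySem.List.pyGetD m (j-1) 0
              then (i+1, j-1) else (i, j-2)).1
            (if PySem.List.pyGetD m i 0 > PySem.List.pyGetD m (j-1) 0
              then (i+1, j-1) else (i, j-2)).2).2 := by
          split_ifs with hc2
          · exact ih (i+1) (j-1) _ (by omega) (by omega) (by omega)
          · exact ih i (j-2) _ (by omega) (by omega) (by omega)
        rw [hrec]
        simp

theorem juego_eq_alt (m : List Int) : juego m = juego_alt m := by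
  have hfin := pvInv_outer m 0 _ le_rfl (by omega) (pvInv_init m)
  rw [juego, juego_alt, reconstruir_solucion]
  rw [pvRecon_eq m _ hfin (((m.length : Int) - 0 + 1).toNat) 0 ((m.length : Int) - 1) []
    (by omega) le_rfl (by omega)]
  simp

-- ===== VERDICT (by name: the statement is the Claim_ definition above) =====
theorem juego_spec : Claim_equal_juego := by
  intro m _
  unfold Spec_juego
  exact juego_eq_alt m
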